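-- pv_equiv track=rewrite | github.com/creative-darkstar/sparta-games-BE | teambuildings/utils.py | get_valid_duration_keys
-- ===== SOURCE A (Python) =====
-- def get_valid_duration_keys(base_duration: str):
--         DURATION_ORDER = {
--             "3M": 1,
--             "6M": 2,
--             "1Y": 3,
--             "GT1Y": 4,
--         }
--         return [
--             key for key, order in DURATION_ORDER.items()
--             if order <= DURATION_ORDER.get(base_duration, 4)
--         ]
-- ===== SOURCE B (Python) =====
-- def get_valid_duration_keys(base_duration: str):
--     # Walk a successor chain from the shortest duration, emitting keys until
--     # the base duration is emitted (or the chain ends).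
--     successor = {"3M": "6M", "6M": "1Y", "1Y": "GT1Y"}
--     keys = []
--     cur = "3M"
--     while cur is not None:
--         keys.append(cur)
--         if cur == base_duration:
--             break
--         cur = successor.get(cur)
--     return keys
-- ===== Notes on version B (the rewrite author's own statement) =====
-- stated objective: alternative
-- what changed: Replaces the rank-dict threshold filter by a successor-chain walk: starting at the shortest duration, follow a next-duration map, emitting each key and stopping early once the base duration has been emitted (an unknown key walks the whole chain).
import Mathlib
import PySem

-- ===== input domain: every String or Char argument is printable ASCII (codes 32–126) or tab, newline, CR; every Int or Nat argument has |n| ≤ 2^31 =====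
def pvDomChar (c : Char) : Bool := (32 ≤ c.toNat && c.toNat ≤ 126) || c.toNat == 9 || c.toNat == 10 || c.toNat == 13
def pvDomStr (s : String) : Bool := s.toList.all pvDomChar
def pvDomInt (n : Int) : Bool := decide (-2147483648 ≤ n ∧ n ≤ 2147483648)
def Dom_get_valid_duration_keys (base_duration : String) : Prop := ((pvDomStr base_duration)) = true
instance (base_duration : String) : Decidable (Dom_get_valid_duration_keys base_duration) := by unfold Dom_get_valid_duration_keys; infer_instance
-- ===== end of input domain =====

-- B replaces the rank-dict threshold filter by a successor-chain walk with early stop (alternative).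


-- ===== PORT A =====
def get_valid_duration_keys (base_duration : String) : List String :=
  let d : PySem.Dict String Int :=
    PySem.Dict.ofList [("3M", 1), ("6M", 2), ("1Y", 3), ("GT1Y", 4)]
  (d.items.filter (fun kv => kv.2 ≤ d.getD base_duration 4)).map (·.1)

-- ===== PORT B =====
-- The while loop of Source B; fuel bounds the walk (the chain has 4 nodes, so 4 steps suffice).
def pvWalk (successor : PySem.Dict String String) (base : String) : Nat → Option String → List String
  | _, none => []
  | 0, some _ => []
  | n + 1, some cur =>
      cur :: (if cur == base then [] else pvWalk successor base n (successor.get? cur))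

def get_valid_duration_keys_alt (base_duration : String) : List String :=
  let successor : PySem.Dict String String :=
    PySem.Dict.ofList [("3M", "6M"), ("6M", "1Y"), ("1Y", "GT1Y")]
  pvWalk successor base_duration 4 (some "3M")

-- ===== PRECONDITION & SPEC =====
def Spec_get_valid_duration_keys (base_duration : String) (out : List String) : Prop := out = get_valid_duration_keys_alt base_duration
instance (base_duration : String) (out : List String) : Decidable (Spec_get_valid_duration_keys base_duration out) := by unfold Spec_get_valid_duration_keys; infer_instance

-- ===== CLAIM =====
def Claim_equal_get_valid_duration_keys : Prop := ∀ (base_duration : String), Dom_get_valid_duration_keys base_duration → Spec_get_valid_duration_keys base_duration (get_valid_duration_keys base_duration)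

-- ===== LEMMAS AND PROOFS =====

-- ===== VERDICT =====
theorem get_valid_duration_keys_spec : Claim_equal_get_valid_duration_keys := by
  intro b _
  unfold Spec_get_valid_duration_keys get_valid_duration_keys get_valid_duration_keys_alt
  by_cases h1 : b = "3M"
  · subst h1; decide
  by_cases h2 : b = "6M"
  · subst h2; decide
  by_cases h3 : b = "1Y"
  · subst h3; decide
  by_cases h4 : b = "GT1Y"
  · subst h4; decide
  have e1 : ("3M" == b) = false := by simpa [beq_iff_eq] using Ne.symm h1
  have e2 : ("6M" == b) = false := by simpa [beq_iff_eq] using Ne.symm h2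
  have e3 : ("1Y" == b) = false := by simpa [beq_iff_eq] using Ne.symm h3
  have e4 : ("GT1Y" == b) = false := by simpa [beq_iff_eq] using Ne.symm h4
  have f1 : (b == "3M") = false := by simpa [beq_iff_eq] using h1
  have f2 : (b == "6M") = false := by simpa [beq_iff_eq] using h2
  have f3 : (b == "1Y") = false := by simpa [beq_iff_eq] using h3
  have f4 : (b == "GT1Y") = false := by simpa [beq_iff_eq] using h4
  simp [PySem.Dict.getD, PySem.Dict.get?, PySem.Dict.ofList, PySem.Dict.empty, PySem.Dict.update,
        PySem.Dict.insert, pvWalk, List.find?,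
        e1, e2, e3, e4, f1, f2, f3]
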